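-- pv_equiv track=rewrite | github.com/axo-lotto/dae_gov | organs/card/algorithms/multi_scale_analyzer.py | _check_diagonal_symmetry
-- ===== SOURCE A (Python) =====
-- from typing import Dict, List, Any, Optional, Tuple
--
-- def _check_diagonal_symmetry(grid: List[List[int]], diagonal_type: str) -> bool:
--     """Check for diagonal symmetry"""
--     height, width = len(grid), len(grid[0])
--
--     if height != width:  # Diagonal symmetry only makes sense for square grids
--         return False
--
--     if diagonal_type == 'main':
--         # Main diagonal (top-left to bottom-right)
--         for i in range(height):
--             for j in range(width):
--                 if grid[i][j] != grid[j][i]: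
--                     return False
--     elif diagonal_type == 'anti':
--         # Anti-diagonal (top-right to bottom-left)
--         for i in range(height):
--             for j in range(width):
--                 if grid[i][j] != grid[width - 1 - j][height - 1 - i]:
--                     return False
--
--     return True
-- ===== SOURCE B (Python) =====
-- def _check_diagonal_symmetry(grid, diagonal_type):
--     """Check for diagonal symmetry by comparing the grid with its (anti-)transpose."""
--     height, width = len(grid), len(grid[0])
--
--     if height != width:  # Diagonal symmetry only makes sense for square grids
--         return False
--
--     if diagonal_type == 'main':
--         return grid == [list(col) for col in zip(*grid)]
--     if diagonal_type == 'anti':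
--         flipped = [row[::-1] for row in reversed(grid)]
--         return grid == [list(col) for col in zip(*flipped)]
--     return True
-- ===== Notes on version B (the rewrite author's own statement) =====
-- stated objective: simpler
-- what changed: Replaces the nested index loops with early return by building the transpose (resp. the anti-transpose, reverse rows then columns) once and returning a single list equality.
-- outside the precondition, e.g. on _check_diagonal_symmetry([[1, 2], [3]], 'main'): A returns False, B returns False
import Mathlib
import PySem

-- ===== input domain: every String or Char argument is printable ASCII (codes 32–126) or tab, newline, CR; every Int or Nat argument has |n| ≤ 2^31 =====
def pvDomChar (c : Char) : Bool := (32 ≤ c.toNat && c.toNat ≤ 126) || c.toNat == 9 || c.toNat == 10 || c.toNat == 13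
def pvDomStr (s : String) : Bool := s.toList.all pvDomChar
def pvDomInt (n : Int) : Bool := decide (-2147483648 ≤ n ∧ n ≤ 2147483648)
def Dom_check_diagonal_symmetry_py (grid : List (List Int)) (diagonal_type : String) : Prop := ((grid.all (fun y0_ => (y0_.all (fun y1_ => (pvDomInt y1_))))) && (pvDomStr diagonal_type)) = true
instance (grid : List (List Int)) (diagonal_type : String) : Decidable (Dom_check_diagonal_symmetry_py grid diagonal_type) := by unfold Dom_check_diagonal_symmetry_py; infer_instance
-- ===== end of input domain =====

-- B replaces the nested index loops (with early return) by building the transpose /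
-- anti-transpose once and comparing it to the grid with a single list equality: simpler.

-- ===== PORT A =====
-- The two nested for-loops with an early `return False` are pure scans, ported as `List.all`
-- over the same Python ranges; grid[i][j] is ported with pyGetD (in range under Pre_).
def check_diagonal_symmetry_py (grid : List (List Int)) (diagonal_type : String) : Bool :=
  let height : Int := grid.length
  let width : Int := ((PySem.List.pyGetD grid 0 []).length : Int)
  if height ≠ width then false
  else if diagonal_type == "main" then
    (PySem.List.pyRange 0 height 1).all (fun i =>
      (PySem.List.pyRange 0 width 1).all (fun j =>
        PySem.List.pyGetD (PySem.List.pyGetD grid i []) j 0 ==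
        PySem.List.pyGetD (PySem.List.pyGetD grid j []) i 0))
  else if diagonal_type == "anti" then
    (PySem.List.pyRange 0 height 1).all (fun i =>
      (PySem.List.pyRange 0 width 1).all (fun j =>
        PySem.List.pyGetD (PySem.List.pyGetD grid i []) j 0 ==
        PySem.List.pyGetD (PySem.List.pyGetD grid (width - 1 - j) []) (height - 1 - i) 0))
  else true

-- ===== PORT B =====
-- zip(*g) of Source B: truncating column extraction, recursing on row tails.
def pyZipStar (g : List (List Int)) : List (List Int) :=
  if h : g.isEmpty || g.any List.isEmpty then []
  else (g.map (fun r => r.headD 0)) :: pyZipStar (g.map List.tail)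
termination_by (g.headD []).length
decreasing_by
  cases g with
  | nil => simp at h
  | cons r rs =>
    simp only [List.isEmpty_cons, List.any_cons, Bool.or_eq_true, List.isEmpty_iff] at h
    push_neg at h
    simp only [List.attach_cons, List.map_cons, List.headD_cons, List.length_tail]
    have : r ≠ [] := by
      intro hr; exact absurd (Or.inl hr) (by simpa using h)
    have : 0 < r.length := List.length_pos_iff.mpr this
    omega

-- row[::-1] is List.reverse (PySem.List.slice?_none_none_neg_one); reversed(grid) is grid.reverse.
def check_diagonal_symmetry_py_alt (grid : List (List Int)) (diagonal_type : String) : Bool :=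
  let height : Int := grid.length
  let width : Int := ((PySem.List.pyGetD grid 0 []).length : Int)
  if height ≠ width then false
  else if diagonal_type == "main" then grid == pyZipStar grid
  else if diagonal_type == "anti" then
    grid == pyZipStar ((grid.reverse).map List.reverse)
  else true

-- ===== PRECONDITION & SPEC =====
-- Pre_ excludes the empty grid (A raises IndexError on grid[0]) and, for the 'main'/'anti'
-- branches, ragged grids whose height equals the first row's width: there A's row-major scan
-- either raises IndexError on a short row or stops at an accidental mismatch, while B's
-- zip-based transpose truncates at the shortest row.
def Pre_check_diagonal_symmetry_py (grid : List (List Int)) (diagonal_type : String) : Prop :=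
  grid ≠ [] ∧
  ((grid.length = (grid.headD []).length ∧ (diagonal_type = "main" ∨ diagonal_type = "anti")) →
    ∀ row ∈ grid, row.length = grid.length)
instance (grid : List (List Int)) (diagonal_type : String) : Decidable (Pre_check_diagonal_symmetry_py grid diagonal_type) := by unfold Pre_check_diagonal_symmetry_py; infer_instance

def pvWitness_check_diagonal_symmetry_py : List (List Int) × String := ([[1, 2], [2, 1]], "main")

def Spec_check_diagonal_symmetry_py (grid : List (List Int)) (diagonal_type : String) (out : Bool) : Prop := out = check_diagonal_symmetry_py_alt grid diagonal_type
instance (grid : List (List Int)) (diagonal_type : String) (out : Bool) : Decidable (Spec_check_diagonal_symmetry_py grid diagonal_type out) := by unfold Spec_check_diagonal_symmetry_py; infer_instance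

-- ===== CLAIM (what is proved, stated in full; the proofs are below) =====
def Claim_equal_check_diagonal_symmetry_py : Prop := ∀ (grid : List (List Int)) (diagonal_type : String), Dom_check_diagonal_symmetry_py grid diagonal_type → Pre_check_diagonal_symmetry_py grid diagonal_type → Spec_check_diagonal_symmetry_py grid diagonal_type (check_diagonal_symmetry_py grid diagonal_type)

-- ===== LEMMAS AND PROOFS =====

-- pyZipStar on a nonempty rectangular grid is the column list.
theorem pyZipStar_rect (k : Nat) :
    ∀ (g : List (List Int)), g ≠ [] → (∀ r ∈ g, r.length = k) →
    pyZipStar g = (List.range k).map (fun j => g.map (fun r => r.getD j 0)) := by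
  induction k with
  | zero =>
    intro g hg hr
    rw [pyZipStar]
    have : g.isEmpty || g.any List.isEmpty := by
      cases g with
      | nil => simp at hg
      | cons r rs =>
        simp only [List.any_cons, Bool.or_eq_true, List.isEmpty_iff]
        right; left
        exact List.length_eq_zero_iff.mp (hr r (by simp))
    simp [this]
  | succ k ih =>
    intro g hg hr
    rw [pyZipStar]
    have hne : ∀ r ∈ g, r ≠ [] := by
      intro r hrm hnil
      have := hr r hrm; rw [hnil] at this; simp at this
    have hcond : ¬ (g.isEmpty || g.any List.isEmpty) = true := by
      simp only [Bool.or_eq_true, List.isEmpty_iff, List.any_eq_true, not_or]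
      constructor
      · exact hg
      · rintro ⟨r, hrm, hre⟩
        exact hne r hrm (by simpa using hre)
    rw [dif_neg hcond]
    have htails : ∀ r ∈ g.map List.tail, r.length = k := by
      intro r hrm
      obtain ⟨s, hsm, rfl⟩ := List.mem_map.mp hrm
      have := hr s hsm
      simp [List.length_tail, this]
    have hgt : g.map List.tail ≠ [] := by
      intro h; exact hg (List.map_eq_nil_iff.mp h)
    rw [ih _ hgt htails, List.range_succ_eq_map]
    simp only [List.map_cons, List.map_map]
    congr 1
    · apply List.map_congr_left
      intro r hrm
      cases r with
      | nil => exact absurd rfl (hne _ hrm)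
      | cons a as => simp
    · apply List.map_congr_left
      intro j _
      simp only [Function.comp]
      apply List.map_congr_left
      intro r hrm
      cases r with
      | nil => exact absurd rfl (hne _ hrm)
      | cons a as => simp

-- grid equals a range-indexed column list iff it agrees entry-wise.
theorem eq_rangeMap_iff (grid : List (List Int)) (n : Nat) (F : Nat → List Int)
    (hlen : grid.length = n) :
    (grid = (List.range n).map F) ↔ (∀ i < n, grid.getD i [] = F i) := by
  constructor
  · intro h i hi
    rw [h]
    rw [List.getD_eq_getElem _ _ (by simpa using hi)]
    simp
  · intro h
    apply List.ext_getElem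
    · simp [hlen]
    · intro i h1 h2
      have hi : i < n := by simpa using h2
      have := h i hi
      rw [List.getD_eq_getElem _ _ h1] at this
      simpa using this

-- two rows of equal length agree iff they agree entry-wise via getD.
theorem row_eq_iff (r s : List Int) (n : Nat) (hr : r.length = n) (hs : s.length = n) :
    r = s ↔ ∀ j < n, r.getD j 0 = s.getD j 0 := by
  constructor
  · intro h j _; rw [h]
  · intro h
    apply List.ext_getElem (by omega)
    intro j h1 h2
    have := h j (by omega)
    rw [List.getD_eq_getElem _ _ h1, List.getD_eq_getElem _ _ h2] at this
    exact this

-- the Bool comparison of Source B equals A's double scan, on rectangular square grids.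
theorem key (grid g : List (List Int)) (n : Nat)
    (hn : grid.length = n) (hR : ∀ r ∈ grid, r.length = n)
    (hgn : g.length = n) (hgR : ∀ r ∈ g, r.length = n) (hgne : g ≠ []) :
    (grid == pyZipStar g) =
    (List.range n).all (fun i => (List.range n).all (fun j =>
       ((grid.getD i []).getD j 0 == (g.getD j []).getD i 0))) := by
  rw [pyZipStar_rect n g hgne hgR, Bool.eq_iff_iff]
  simp only [beq_iff_eq, List.all_eq_true, List.mem_range]
  rw [eq_rangeMap_iff grid n _ hn]
  apply forall_congr'
  intro i
  apply imp_congr_right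
  intro hi
  have hmem : grid.getD i [] ∈ grid := by
    rw [List.getD_eq_getElem _ _ (by omega)]
    exact List.getElem_mem _
  rw [row_eq_iff _ _ n (hR _ hmem) (by simp [hgn])]
  apply forall_congr'
  intro j
  apply imp_congr_right
  intro hj
  have hmap : (g.map (fun r => r.getD i 0)).getD j 0 = (g.getD j []).getD i 0 :=
    List.getD_map g [] (fun r => r.getD i 0)
  rw [hmap]

-- entry of the reversed-rows-and-columns grid, as A's anti-diagonal access.
theorem anti_entry (grid : List (List Int)) (n : Nat) (hn : grid.length = n)
    (hR : ∀ r ∈ grid, r.length = n) (i j : Nat) (hi : i < n) (hj : j < n) :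
    ((grid.reverse.map List.reverse).getD j []).getD i 0 =
    PySem.List.pyGetD (PySem.List.pyGetD grid ((n : Int) - 1 - (j : Int)) [])
      ((n : Int) - 1 - (i : Int)) 0 := by
  have e1 : ((n : Int) - 1 - (j : Int)) = ((n - 1 - j : Nat) : Int) := by omega
  have e2 : ((n : Int) - 1 - (i : Int)) = ((n - 1 - i : Nat) : Int) := by omega
  rw [e1, e2, PySem.List.pyGetD_natCast, PySem.List.pyGetD_natCast]
  have hrow : grid.getD (n - 1 - j) [] ∈ grid := by
    rw [List.getD_eq_getElem _ _ (by omega)]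
    exact List.getElem_mem _
  have hrl : (grid.getD (n - 1 - j) []).length = n := hR _ hrow
  have hmap : (grid.reverse.map List.reverse).getD j [] = (grid.reverse.getD j []).reverse :=
    List.getD_map grid.reverse [] List.reverse
  rw [hmap, List.getD_reverse (l := grid) j (by omega), hn]
  rw [List.getD_reverse (l := grid.getD (n - 1 - j) []) i (by rw [hrl]; omega), hrl]

theorem check_diagonal_symmetry_py_spec : Claim_equal_check_diagonal_symmetry_py := by
  intro grid dt _ hpre
  obtain ⟨hg, hrect⟩ := hpre
  show check_diagonal_symmetry_py grid dt = check_diagonal_symmetry_py_alt grid dt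
  simp only [check_diagonal_symmetry_py, check_diagonal_symmetry_py_alt]
  by_cases hsq : ((grid.length : Int) ≠ ((PySem.List.pyGetD grid 0 []).length : Int))
  · rw [if_pos hsq, if_pos hsq]
  · rw [if_neg hsq, if_neg hsq]
    have hw : ((PySem.List.pyGetD grid 0 []).length) = grid.length := by
      have := not_ne_iff.mp hsq
      exact_mod_cast this.symm
    have hh : grid.headD [] = PySem.List.pyGetD grid 0 [] := by
      cases grid with
      | nil => exact absurd rfl hg
      | cons r rs => simp [PySem.List.pyGetD]
    by_cases hm : (dt == "main") = true
    · rw [if_pos hm, if_pos hm]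
      have hR : ∀ r ∈ grid, r.length = grid.length :=
        hrect ⟨by rw [hh, hw], Or.inl (by simpa using hm)⟩
      rw [key grid grid grid.length rfl hR rfl hR hg, hw, Bool.eq_iff_iff]
      simp only [PySem.List.pyRange_zero_natCast, List.all_map, Function.comp,
        PySem.List.pyGetD_natCast, List.all_eq_true, List.mem_range, beq_iff_eq]
    · rw [if_neg hm, if_neg hm]
      by_cases ha : (dt == "anti") = true
      · rw [if_pos ha, if_pos ha]
        have hR : ∀ r ∈ grid, r.length = grid.length :=
          hrect ⟨by rw [hh, hw], Or.inr (by simpa using ha)⟩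
        have hgne : grid.reverse.map List.reverse ≠ [] := by
          simp only [ne_eq, List.map_eq_nil_iff, List.reverse_eq_nil_iff]
          exact hg
        have hgR : ∀ r ∈ grid.reverse.map List.reverse, r.length = grid.length := by
          intro r hr
          obtain ⟨s, hs, rfl⟩ := List.mem_map.mp hr
          rw [List.length_reverse]
          exact hR _ (List.mem_reverse.mp hs)
        rw [key grid (grid.reverse.map List.reverse) grid.length rfl hR (by simp) hgR hgne,
          hw, Bool.eq_iff_iff]
        simp only [PySem.List.pyRange_zero_natCast, List.all_map, Function.comp,
          PySem.List.pyGetD_natCast, List.all_eq_true, List.mem_range, beq_iff_eq]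
        constructor
        · intro h i hi j hj
          rw [anti_entry grid grid.length rfl hR i j hi hj]
          exact h i hi j hj
        · intro h i hi j hj
          rw [← anti_entry grid grid.length rfl hR i j hi hj]
          exact h i hi j hj
      · rw [if_neg ha, if_neg ha]
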